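-- pv_equiv track=rewrite | github.com/junohpark221/Programmers_Coding_Interview_Questions | Level_3/파괴되지_않는_건물.py | solution
-- ===== SOURCE A (Python) =====
-- def solution(board, skill):
--     n=len(board)
--     m=len(board[0])
--     answer=0
--     rangeSum=[[0 for _ in range(m+1)] for _ in range(n+1)]
--
--     for this in skill:
--         r1, c1, r2, c2 = this[1], this[2], this[3], this[4]
--         if this[0]==1:  degree=-this[5]
--         else:   degree=this[5]
--
--         rangeSum[r1][c1]+=degree
--         rangeSum[r1][c2+1]-=degree
--         rangeSum[r2+1][c1]-=degree
--         rangeSum[r2+1][c2+1]+=degree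
--
--     prev=0
--     for i in range(n+1):
--         for j in range(m+1):
--             rangeSum[i][j]+=prev
--             prev=rangeSum[i][j]
--
--     prev=0
--     for j in range(m+1):
--         for i in range(n+1):
--             rangeSum[i][j]+=prev
--             prev=rangeSum[i][j]
--
--     for i in range(n):
--         for j in range(m):
--             if rangeSum[i][j]+board[i][j]>0:    answer+=1
--
--     return answer
-- ===== SOURCE B (Python) =====
-- def solution(board, skill):
--     m = len(board[0])
--     effects = []
--     for s in skill:
--         d = -s[5] if s[0] == 1 else s[5]
--         effects.append((s[1], s[2], s[3], s[4], d))
--     count = 0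
--     for i, row in enumerate(board):
--         for j in range(m):
--             total = row[j]
--             for (r1, c1, r2, c2, d) in effects:
--                 if r1 <= i <= r2 and c1 <= j <= c2:
--                     total += d
--             if total > 0:
--                 count += 1
--     return count
-- ===== Notes on version B (the rewrite author's own statement) =====
-- stated objective: simpler
-- what changed: Replaces the 2D difference-array with carried prefix-sum passes by a direct per-cell scan: for each of the n*m grid cells, sum the signed degrees of the skills whose rectangle covers it and test > 0.
-- outside the precondition, e.g. on solution([[0, 0], [0, 0]], [[2, -2, 0, 0, 0, 5]]): A returns 0, B returns 1; on solution([[1], [1], [1]], [[2, 2, 0, 0, 0, 5]]): A returns 2, B returns 3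
import Mathlib
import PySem

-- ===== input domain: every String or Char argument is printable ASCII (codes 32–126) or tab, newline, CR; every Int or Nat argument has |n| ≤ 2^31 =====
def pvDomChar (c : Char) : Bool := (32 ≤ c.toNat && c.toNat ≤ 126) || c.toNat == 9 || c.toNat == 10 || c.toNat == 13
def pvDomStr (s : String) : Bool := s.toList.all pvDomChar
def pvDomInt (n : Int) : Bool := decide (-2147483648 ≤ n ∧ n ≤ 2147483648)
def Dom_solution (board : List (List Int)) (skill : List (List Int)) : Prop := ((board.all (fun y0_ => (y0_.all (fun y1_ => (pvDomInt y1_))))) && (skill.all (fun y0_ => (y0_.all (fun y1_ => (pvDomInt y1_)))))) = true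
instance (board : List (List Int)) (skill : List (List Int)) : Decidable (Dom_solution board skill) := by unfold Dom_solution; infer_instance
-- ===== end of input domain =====

-- B replaces A's 2D difference-array + two carried prefix-sum passes by a direct per-cell
-- sum of the covering skills' signed degrees (simpler, not faster); equivalence is proved
-- on the problem's natural domain (rectangular nonempty board, in-range skill rectangles).

-- ===== PORT A =====
-- shared tiny helpers for Python list indexing
def sget (s : List Int) (k : Int) : Int := (PySem.List.pyGet? s k).getD 0

def gget (g : List (List Int)) (i j : Nat) : Int := (g.getD i []).getD j 0

def gset (g : List (List Int)) (i j : Nat) (v : Int) : List (List Int) :=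
  g.set i ((g.getD i []).set j v)

-- Python `rangeSum[i][j] += d` (indices may be negative: Python wraps; exact on in-range indices)
def bumpA (g : List (List Int)) (i j d : Int) : List (List Int) :=
  let ii : Nat := (if i < 0 then i + g.length else i).toNat
  let row := g.getD ii []
  let jj : Nat := (if j < 0 then j + row.length else j).toNat
  g.set ii (row.set jj (row.getD jj 0 + d))

-- the body of A's `for this in skill` loop
def stepA (g : List (List Int)) (s : List Int) : List (List Int) :=
  let r1 := sget s 1
  let c1 := sget s 2
  let r2 := sget s 3
  let c2 := sget s 4
  let degree := if sget s 0 = 1 then -(sget s 5) else sget s 5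
  bumpA (bumpA (bumpA (bumpA g r1 c1 degree) r1 (c2 + 1) (-degree)) (r2 + 1) c1 (-degree)) (r2 + 1) (c2 + 1) degree

-- one step `rangeSum[i][j] += prev; prev = rangeSum[i][j]` of A's prefix passes
def scanStep (i : Nat) (gp : List (List Int) × Int) (j : Nat) : List (List Int) × Int :=
  let v := gget gp.1 i j + gp.2
  (gset gp.1 i j v, v)

def rowPass (n1 m1 : Nat) (g : List (List Int)) : List (List Int) × Int :=
  (List.range n1).foldl (fun gp i => (List.range m1).foldl (scanStep i) gp) (g, 0)

def colPass (n1 m1 : Nat) (g : List (List Int)) : List (List Int) × Int :=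
  (List.range m1).foldl (fun gp j => (List.range n1).foldl (fun gp i => scanStep i gp j) gp) (g, 0)

def solution (board : List (List Int)) (skill : List (List Int)) : Int :=
  let n := board.length
  let m := (board.getD 0 []).length
  let g0 : List (List Int) := List.replicate (n + 1) (List.replicate (m + 1) 0)
  let g1 := skill.foldl stepA g0
  let g2 := (rowPass (n + 1) (m + 1) g1).1
  let g3 := (colPass (n + 1) (m + 1) g2).1
  (List.range n).foldl (fun a i => (List.range m).foldl (fun a j =>
    if gget g3 i j + gget board i j > 0 then a + 1 else a) a) 0

-- ===== PORT B =====
def effectOf (s : List Int) : Int × Int × Int × Int × Int :=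
  let d := if sget s 0 = 1 then -(sget s 5) else sget s 5
  (sget s 1, sget s 2, sget s 3, sget s 4, d)

def cellTotal (effects : List (Int × Int × Int × Int × Int)) (i j hp : Int) : Int :=
  effects.foldl (fun t e =>
    if e.1 ≤ i ∧ i ≤ e.2.2.1 ∧ e.2.1 ≤ j ∧ j ≤ e.2.2.2.1 then t + e.2.2.2.2 else t) hp

def solution_alt (board : List (List Int)) (skill : List (List Int)) : Int :=
  let m := (board.getD 0 []).length
  let effects := skill.map effectOf
  (PySem.List.enumerate board 0).foldl (fun cnt ir =>
    (List.range m).foldl (fun cnt (j : Nat) =>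
      if cellTotal effects ir.1 (j : Int) ((PySem.List.pyGet? ir.2 (j : Int)).getD 0) > 0
      then cnt + 1 else cnt) cnt) 0

-- ===== PRECONDITION & SPEC =====
-- Pre_ restricts to the problem's natural domain: a nonempty board whose rows all have at
-- least m = len(board[0]) entries, and skills [type,r1,c1,r2,c2,deg] with 0 ≤ r1 ≤ r2 < n and
-- 0 ≤ c1 ≤ c2 < m; outside it A raises (IndexError), or — with negative or inverted skill
-- coordinates — returns values that are artefacts of Python negative-index wraparound and of
-- the difference-array layout, which no caller of the puzzle solver would specify.
def Pre_solution (board : List (List Int)) (skill : List (List Int)) : Prop :=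
  board ≠ [] ∧
  (∀ row ∈ board, (board.getD 0 []).length ≤ row.length) ∧
  (∀ s ∈ skill, 6 ≤ s.length ∧
    0 ≤ sget s 1 ∧ sget s 1 ≤ sget s 3 ∧ sget s 3 < (board.length : Int) ∧
    0 ≤ sget s 2 ∧ sget s 2 ≤ sget s 4 ∧ sget s 4 < (((board.getD 0 []).length : Int)))

instance (board : List (List Int)) (skill : List (List Int)) : Decidable (Pre_solution board skill) := by
  unfold Pre_solution; infer_instance

def pvWitness_solution : List (List Int) × List (List Int) :=
  ([[1, 0], [0, 2]], [[1, 0, 0, 1, 1, 1], [2, 0, 0, 0, 1, 3]])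

def Spec_solution (board : List (List Int)) (skill : List (List Int)) (out : Int) : Prop := out = solution_alt board skill
instance (board : List (List Int)) (skill : List (List Int)) (out : Int) : Decidable (Spec_solution board skill out) := by unfold Spec_solution; infer_instance

-- ===== CLAIM (what is proved, stated in full; the proofs are below) =====
def Claim_equal_solution : Prop := ∀ (board : List (List Int)) (skill : List (List Int)), Dom_solution board skill → Pre_solution board skill → Spec_solution board skill (solution board skill)

-- ===== LEMMAS AND PROOFS =====

-- mathematical reading of A's grids, used only by the proofs
def degOf (s : List Int) : Int := if sget s 0 = 1 then -(sget s 5) else sget s 5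

def corner (s : List Int) (i j : Nat) : Int :=
  (if (i : Int) = sget s 1 ∧ (j : Int) = sget s 2 then degOf s else 0)
  - (if (i : Int) = sget s 1 ∧ (j : Int) = sget s 4 + 1 then degOf s else 0)
  - (if (i : Int) = sget s 3 + 1 ∧ (j : Int) = sget s 2 then degOf s else 0)
  + (if (i : Int) = sget s 3 + 1 ∧ (j : Int) = sget s 4 + 1 then degOf s else 0)

def eff (s : List Int) (i j : Nat) : Int :=
  if sget s 1 ≤ (i : Int) ∧ (i : Int) ≤ sget s 3 ∧ sget s 2 ≤ (j : Int) ∧ (j : Int) ≤ sget s 4 then degOf s else 0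

def Shape (g : List (List Int)) (n1 m1 : Nat) : Prop :=
  g.length = n1 ∧ ∀ row ∈ g, row.length = m1

def InR (s : List Int) (n m : Nat) : Prop :=
  0 ≤ sget s 1 ∧ sget s 1 ≤ sget s 3 ∧ sget s 3 < (n : Int) ∧
  0 ≤ sget s 2 ∧ sget s 2 ≤ sget s 4 ∧ sget s 4 < (m : Int)

theorem getD_set {α : Type} (l : List α) (n i : Nat) (v d : α) (hn : n < l.length) :
    (l.set n v).getD i d = if i = n then v else l.getD i d := by
  simp only [List.getD_eq_getElem?_getD, List.getElem?_set]
  split_ifs with h1 h2 h3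
  · simp
  · omega
  · omega
  · rfl

theorem shape_gset {g : List (List Int)} {n1 m1 : Nat} (hs : Shape g n1 m1)
    (i j : Nat) (v : Int) : Shape (gset g i j v) n1 m1 := by
  obtain ⟨h1, h2⟩ := hs
  unfold gset
  refine ⟨by simpa using h1, ?_⟩
  intro row hrow
  by_cases hi : i < g.length
  · rcases List.mem_or_eq_of_mem_set hrow with h | h
    · exact h2 _ h
    · subst h
      rw [List.length_set, List.getD_eq_getElem g [] hi]
      exact h2 _ (List.getElem_mem hi)
  · rw [List.set_eq_of_length_le (by omega)] at hrow
    exact h2 _ hrow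

theorem gget_gset {g : List (List Int)} {n1 m1 : Nat} (hs : Shape g n1 m1)
    {i0 j0 : Nat} (h1 : i0 < n1) (h2 : j0 < m1) (v : Int) (i j : Nat) :
    gget (gset g i0 j0 v) i j = if i = i0 ∧ j = j0 then v else gget g i j := by
  obtain ⟨hl, hr⟩ := hs
  have hi0 : i0 < g.length := by omega
  have hrow : (g.getD i0 []).length = m1 := by
    rw [List.getD_eq_getElem g [] hi0]; exact hr _ (List.getElem_mem hi0)
  unfold gget gset
  rw [getD_set _ _ _ _ _ hi0]
  by_cases hii : i = i0
  · subst hii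
    rw [if_pos rfl, getD_set _ _ _ _ _ (show j0 < (g.getD i []).length by omega)]
    by_cases hjj : j = j0 <;> simp [hjj]
  · simp [hii]

theorem bumpA_eq_gset (g : List (List Int)) {i j : Int} (d : Int) (hi : 0 ≤ i) (hj : 0 ≤ j) :
    bumpA g i j d = gset g i.toNat j.toNat (gget g i.toNat j.toNat + d) := by
  unfold bumpA gset gget
  simp only [if_neg (show ¬ i < 0 by omega), if_neg (show ¬ j < 0 by omega)]

theorem gget_bumpA {g : List (List Int)} {n1 m1 : Nat} (hs : Shape g n1 m1)
    {a b : Int} (d : Int) (ha0 : 0 ≤ a) (ha : a < (n1 : Int)) (hb0 : 0 ≤ b) (hb : b < (m1 : Int))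
    (i j : Nat) :
    gget (bumpA g a b d) i j = gget g i j + (if (i : Int) = a ∧ (j : Int) = b then d else 0) := by
  rw [bumpA_eq_gset g d ha0 hb0,
    gget_gset hs (by omega) (by omega) _ i j]
  by_cases h : i = a.toNat ∧ j = b.toNat
  · obtain ⟨h1, h2⟩ := h
    rw [if_pos ⟨h1, h2⟩, if_pos (by omega), h1, h2]
  · rw [if_neg h, if_neg (by omega), add_zero]

theorem shape_bumpA {g : List (List Int)} {n1 m1 : Nat} (hs : Shape g n1 m1)
    {a b : Int} (d : Int) (ha0 : 0 ≤ a) (hb0 : 0 ≤ b) : Shape (bumpA g a b d) n1 m1 := by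
  rw [bumpA_eq_gset g d ha0 hb0]
  exact shape_gset hs _ _ _

theorem ite_neg_zero (c : Prop) [Decidable c] (d : Int) :
    (if c then -d else 0) = -(if c then d else 0) := by
  split_ifs <;> simp

theorem gget_stepA {g : List (List Int)} {n m : Nat} (hs : Shape g (n+1) (m+1))
    {s : List Int} (hr : InR s n m) (i j : Nat) :
    gget (stepA g s) i j = gget g i j + corner s i j := by
  obtain ⟨h1, h2, h3, h4, h5, h6⟩ := hr
  have s1 := shape_bumpA (d := if sget s 0 = 1 then -sget s 5 else sget s 5)
    (a := sget s 1) (b := sget s 2) hs h1 h4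
  have s2 := shape_bumpA (d := -(if sget s 0 = 1 then -sget s 5 else sget s 5))
    (a := sget s 1) (b := sget s 4 + 1) s1 h1 (by omega)
  have s3 := shape_bumpA (d := -(if sget s 0 = 1 then -sget s 5 else sget s 5))
    (a := sget s 3 + 1) (b := sget s 2) s2 (by omega) h4
  unfold stepA
  rw [gget_bumpA s3 _ (by omega) (by push_cast; omega) (by omega) (by push_cast; omega),
      gget_bumpA s2 _ (by omega) (by push_cast; omega) (by omega) (by push_cast; omega),
      gget_bumpA s1 _ (by omega) (by push_cast; omega) (by omega) (by push_cast; omega),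
      gget_bumpA hs _ (by omega) (by push_cast; omega) (by omega) (by push_cast; omega)]
  unfold corner degOf
  rw [ite_neg_zero, ite_neg_zero]
  ring

theorem shape_stepA {g : List (List Int)} {n m : Nat} (hs : Shape g (n+1) (m+1))
    {s : List Int} (hr : InR s n m) : Shape (stepA g s) (n+1) (m+1) := by
  obtain ⟨h1, h2, h3, h4, h5, h6⟩ := hr
  unfold stepA
  exact shape_bumpA (shape_bumpA (shape_bumpA (shape_bumpA hs _ h1 h4) _ h1 (by omega)) _ (by omega) h4) _ (by omega) (by omega)

theorem gget_foldl_stepA {n m : Nat} (skill : List (List Int))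
    (hr : ∀ s ∈ skill, InR s n m) {g : List (List Int)} (hs : Shape g (n+1) (m+1)) (i j : Nat) :
    gget (skill.foldl stepA g) i j = gget g i j + (skill.map (fun s => corner s i j)).sum ∧
    Shape (skill.foldl stepA g) (n+1) (m+1) := by
  induction skill generalizing g with
  | nil => simpa using hs
  | cons s rest ih =>
    have hrs := hr s (by simp)
    have h' := ih (fun t ht => hr t (by simp [ht])) (shape_stepA hs hrs)
    refine ⟨?_, h'.2⟩
    rw [List.foldl_cons, h'.1, gget_stepA hs hrs]
    simp [add_assoc]

theorem inner_row {g : List (List Int)} {n m : Nat} (hs : Shape g (n+1) (m+1))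
    {i : Nat} (hi : i ≤ n) (p : Int) (k : Nat) (hk : k ≤ m + 1) :
    (∀ i' j', gget ((List.range k).foldl (scanStep i) (g, p)).1 i' j' =
        if i' = i ∧ j' < k then p + ∑ t ∈ Finset.range (j' + 1), gget g i t else gget g i' j') ∧
    ((List.range k).foldl (scanStep i) (g, p)).2 = p + ∑ t ∈ Finset.range k, gget g i t ∧
    Shape ((List.range k).foldl (scanStep i) (g, p)).1 (n+1) (m+1) := by
  induction k with
  | zero =>
    refine ⟨?_, by simp, by simpa using hs⟩
    intro i' j'
    simp
  | succ k ih =>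
    obtain ⟨ihg, ihc, ihs⟩ := ih (by omega)
    rw [show List.range (k+1) = List.range k ++ [k] from List.range_succ,
        List.foldl_append, List.foldl_cons, List.foldl_nil]
    set R := (List.range k).foldl (scanStep i) (g, p) with hR
    have hgk : gget R.1 i k = gget g i k := by rw [ihg]; simp
    have hv : gget R.1 i k + R.2 = p + ∑ t ∈ Finset.range (k + 1), gget g i t := by
      rw [hgk, ihc, Finset.sum_range_succ]; ring
    simp only [scanStep]
    refine ⟨?_, ?_, shape_gset ihs _ _ _⟩
    · intro i' j'
      rw [gget_gset ihs (by omega) (by omega) _ i' j']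
      by_cases hji : i' = i ∧ j' = k
      · rw [if_pos hji, hv, if_pos (show i' = i ∧ j' < k + 1 by omega), hji.2]
      · rw [if_neg hji, ihg i' j']
        by_cases h2 : i' = i ∧ j' < k
        · rw [if_pos h2, if_pos (show i' = i ∧ j' < k + 1 by omega)]
        · rw [if_neg h2, if_neg (show ¬ (i' = i ∧ j' < k + 1) by omega)]
    · exact hv

theorem rowPass_char {g : List (List Int)} {n m : Nat} (hs : Shape g (n+1) (m+1))
    (hz : ∀ i, ∑ t ∈ Finset.range (m + 1), gget g i t = 0) (k : Nat) (hk : k ≤ n + 1) :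
    (∀ i' j', gget (((List.range k).foldl (fun gp i => (List.range (m+1)).foldl (scanStep i) gp) (g, 0)).1) i' j' =
        if i' < k ∧ j' ≤ m then ∑ t ∈ Finset.range (j' + 1), gget g i' t else gget g i' j') ∧
    (((List.range k).foldl (fun gp i => (List.range (m+1)).foldl (scanStep i) gp) (g, 0)).2 = 0) ∧
    Shape (((List.range k).foldl (fun gp i => (List.range (m+1)).foldl (scanStep i) gp) (g, 0)).1) (n+1) (m+1) := by
  induction k with
  | zero =>
    refine ⟨?_, by simp, by simpa using hs⟩
    intro i' j'
    simp
  | succ k ih =>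
    obtain ⟨ihg, ihc, ihs⟩ := ih (by omega)
    rw [show List.range (k+1) = List.range k ++ [k] from List.range_succ,
        List.foldl_append, List.foldl_cons, List.foldl_nil]
    set R := (List.range k).foldl (fun gp i => (List.range (m+1)).foldl (scanStep i) gp) (g, 0) with hR
    have hRsplit : R = (R.1, (0 : Int)) := by rw [← ihc]
    have hrowk : ∀ t, gget R.1 k t = gget g k t := by
      intro t; rw [ihg]; simp
    rw [hRsplit]
    obtain ⟨jg, jc, js⟩ := inner_row ihs (show k ≤ n by omega) 0 (m+1) (le_refl _)
    refine ⟨?_, ?_, js⟩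
    · intro i' j'
      rw [jg i' j']
      by_cases h1 : i' = k ∧ j' < m + 1
      · rw [if_pos h1, if_pos (show i' < k + 1 ∧ j' ≤ m by omega), h1.1]
        rw [zero_add]
        exact Finset.sum_congr rfl (fun t _ => hrowk t)
      · rw [if_neg h1, ihg i' j']
        by_cases h2 : i' < k ∧ j' ≤ m
        · rw [if_pos h2, if_pos (show i' < k + 1 ∧ j' ≤ m by omega)]
        · rw [if_neg h2, if_neg (show ¬ (i' < k + 1 ∧ j' ≤ m) by omega)]
    · rw [jc, zero_add]
      rw [Finset.sum_congr rfl (fun t _ => hrowk t)]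
      exact hz k
theorem inner_col {g : List (List Int)} {n m : Nat} (hs : Shape g (n+1) (m+1))
    {j : Nat} (hj : j ≤ m) (p : Int) (k : Nat) (hk : k ≤ n + 1) :
    (∀ i' j', gget ((List.range k).foldl (fun gp i => scanStep i gp j) (g, p)).1 i' j' =
        if j' = j ∧ i' < k then p + ∑ t ∈ Finset.range (i' + 1), gget g t j else gget g i' j') ∧
    ((List.range k).foldl (fun gp i => scanStep i gp j) (g, p)).2 = p + ∑ t ∈ Finset.range k, gget g t j ∧
    Shape ((List.range k).foldl (fun gp i => scanStep i gp j) (g, p)).1 (n+1) (m+1) := by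
  induction k with
  | zero =>
    refine ⟨?_, by simp, by simpa using hs⟩
    intro i' j'
    simp
  | succ k ih =>
    obtain ⟨ihg, ihc, ihs⟩ := ih (by omega)
    rw [show List.range (k+1) = List.range k ++ [k] from List.range_succ,
        List.foldl_append, List.foldl_cons, List.foldl_nil]
    set R := (List.range k).foldl (fun gp i => scanStep i gp j) (g, p) with hR
    have hgk : gget R.1 k j = gget g k j := by rw [ihg]; simp
    have hv : gget R.1 k j + R.2 = p + ∑ t ∈ Finset.range (k + 1), gget g t j := by
      rw [hgk, ihc, Finset.sum_range_succ]; ring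
    simp only [scanStep]
    refine ⟨?_, ?_, shape_gset ihs _ _ _⟩
    · intro i' j'
      rw [gget_gset ihs (by omega) (by omega) _ i' j']
      by_cases hji : i' = k ∧ j' = j
      · rw [if_pos hji, hv, if_pos (show j' = j ∧ i' < k + 1 by omega), hji.1]
      · rw [if_neg hji, ihg i' j']
        by_cases h2 : j' = j ∧ i' < k
        · rw [if_pos h2, if_pos (show j' = j ∧ i' < k + 1 by omega)]
        · rw [if_neg h2, if_neg (show ¬ (j' = j ∧ i' < k + 1) by omega)]
    · exact hv
theorem colPass_char {g : List (List Int)} {n m : Nat} (hs : Shape g (n+1) (m+1))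
    (hz : ∀ j ≤ m, ∑ t ∈ Finset.range (n + 1), gget g t j = 0) (k : Nat) (hk : k ≤ m + 1) :
    (∀ i' j', gget (((List.range k).foldl (fun gp j => (List.range (n+1)).foldl (fun gp i => scanStep i gp j) gp) (g, 0)).1) i' j' =
        if j' < k ∧ i' ≤ n then ∑ t ∈ Finset.range (i' + 1), gget g t j' else gget g i' j') ∧
    (((List.range k).foldl (fun gp j => (List.range (n+1)).foldl (fun gp i => scanStep i gp j) gp) (g, 0)).2 = 0) ∧
    Shape (((List.range k).foldl (fun gp j => (List.range (n+1)).foldl (fun gp i => scanStep i gp j) gp) (g, 0)).1) (n+1) (m+1) := by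
  induction k with
  | zero =>
    refine ⟨?_, by simp, by simpa using hs⟩
    intro i' j'
    simp
  | succ k ih =>
    obtain ⟨ihg, ihc, ihs⟩ := ih (by omega)
    rw [show List.range (k+1) = List.range k ++ [k] from List.range_succ,
        List.foldl_append, List.foldl_cons, List.foldl_nil]
    set R := (List.range k).foldl (fun gp j => (List.range (n+1)).foldl (fun gp i => scanStep i gp j) gp) (g, 0) with hR
    have hRsplit : R = (R.1, (0 : Int)) := by rw [← ihc]
    have hcolk : ∀ t, gget R.1 t k = gget g t k := by
      intro t; rw [ihg]; simp
    rw [hRsplit]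
    obtain ⟨jg, jc, js⟩ := inner_col ihs (show k ≤ m by omega) 0 (n+1) (le_refl _)
    refine ⟨?_, ?_, js⟩
    · intro i' j'
      rw [jg i' j']
      by_cases h1 : j' = k ∧ i' < n + 1
      · rw [if_pos h1, if_pos (show j' < k + 1 ∧ i' ≤ n by omega), h1.1]
        rw [zero_add]
        exact Finset.sum_congr rfl (fun t _ => hcolk t)
      · rw [if_neg h1, ihg i' j']
        by_cases h2 : j' < k ∧ i' ≤ n
        · rw [if_pos h2, if_pos (show j' < k + 1 ∧ i' ≤ n by omega)]
        · rw [if_neg h2, if_neg (show ¬ (j' < k + 1 ∧ i' ≤ n) by omega)]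
    · rw [jc, zero_add]
      rw [Finset.sum_congr rfl (fun t _ => hcolk t)]
      exact hz k (by omega)
-- indicator sums
theorem sum_ite_cast {K : Nat} {c : Int} (f : Int) (h0 : 0 ≤ c) (hK : c < (K : Int)) :
    (∑ t ∈ Finset.range K, if (t : Int) = c then f else 0) = f := by
  have hcond : ∀ t : Nat, ((t : Int) = c) ↔ (t = c.toNat) := by intro t; omega
  calc (∑ t ∈ Finset.range K, if (t : Int) = c then f else 0)
      = ∑ t ∈ Finset.range K, if t = c.toNat then f else 0 := by
        exact Finset.sum_congr rfl (fun t _ => by rw [if_congr (hcond t) rfl rfl])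
    _ = f := by
        rw [Finset.sum_ite_eq' (Finset.range K) c.toNat (fun _ => f)]
        rw [if_pos (Finset.mem_range.mpr (by omega))]

theorem sum_ite_cast' {K : Nat} {c : Int} (f : Int) (h0 : 0 ≤ c) :
    (∑ t ∈ Finset.range K, if (t : Int) = c then f else 0) = if c < (K : Int) then f else 0 := by
  by_cases hcK : c < (K : Int)
  · rw [if_pos hcK, sum_ite_cast f h0 hcK]
  · rw [if_neg hcK]
    apply Finset.sum_eq_zero
    intro t ht
    have := Finset.mem_range.mp ht
    rw [if_neg (by omega)]

theorem sum_and_left {K : Nat} {c : Int} (P : Prop) [Decidable P] (f : Int) (h0 : 0 ≤ c)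
    (hK : c < (K : Int)) :
    (∑ t ∈ Finset.range K, if P ∧ (t : Int) = c then f else 0) = if P then f else 0 := by
  by_cases hP : P
  · simp only [hP, true_and, if_true]
    exact sum_ite_cast f h0 hK
  · simp only [hP, false_and, if_false]
    simp

theorem sum_and_right {K : Nat} {c : Int} (P : Prop) [Decidable P] (f : Int) (h0 : 0 ≤ c)
    (hK : c < (K : Int)) :
    (∑ t ∈ Finset.range K, if (t : Int) = c ∧ P then f else 0) = if P then f else 0 := by
  by_cases hP : P
  · simp only [hP, and_true, if_true]
    exact sum_ite_cast f h0 hK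
  · simp only [hP, and_false, if_false]
    simp

theorem sum2_ind (I J : Nat) (R C d : Int) (hR : 0 ≤ R) (hC : 0 ≤ C) :
    (∑ a ∈ Finset.range I, ∑ b ∈ Finset.range J,
      if (a : Int) = R ∧ (b : Int) = C then d else 0) =
    if R < (I : Int) ∧ C < (J : Int) then d else 0 := by
  by_cases hCJ : C < (J : Int)
  · have inner : ∀ a : Nat, (∑ b ∈ Finset.range J, if (a : Int) = R ∧ (b : Int) = C then d else 0)
        = if (a : Int) = R then d else 0 := by
      intro a
      by_cases hA : (a : Int) = R
      · simp only [hA, eq_self_iff_true, true_and, if_true]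
        exact sum_ite_cast d hC hCJ
      · simp [hA]
    rw [Finset.sum_congr rfl (fun a _ => inner a), sum_ite_cast' d hR]
    simp [hCJ]
  · rw [if_neg (by tauto)]
    apply Finset.sum_eq_zero
    intro a _
    apply Finset.sum_eq_zero
    intro b hb
    have := Finset.mem_range.mp hb
    rw [if_neg (by omega)]

theorem corner_row_sum {s : List Int} {n m : Nat} (hr : InR s n m) (i : Nat) :
    (∑ t ∈ Finset.range (m + 1), corner s i t) = 0 := by
  obtain ⟨h1, h2, h3, h4, h5, h6⟩ := hr
  unfold corner
  rw [Finset.sum_add_distrib, Finset.sum_sub_distrib, Finset.sum_sub_distrib]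
  rw [sum_and_left _ _ h4 (by push_cast; omega),
      sum_and_left _ _ (by omega : (0:Int) ≤ sget s 4 + 1) (by push_cast; omega),
      sum_and_left _ _ h4 (by push_cast; omega),
      sum_and_left _ _ (by omega : (0:Int) ≤ sget s 4 + 1) (by push_cast; omega)]
  ring

theorem corner_col_sum {s : List Int} {n m : Nat} (hr : InR s n m) (j : Nat) :
    (∑ t ∈ Finset.range (n + 1), corner s t j) = 0 := by
  obtain ⟨h1, h2, h3, h4, h5, h6⟩ := hr
  unfold corner
  rw [Finset.sum_add_distrib, Finset.sum_sub_distrib, Finset.sum_sub_distrib]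
  rw [sum_and_right _ _ h1 (by push_cast; omega),
      sum_and_right _ _ h1 (by push_cast; omega),
      sum_and_right _ _ (by omega : (0:Int) ≤ sget s 3 + 1) (by push_cast; omega),
      sum_and_right _ _ (by omega : (0:Int) ≤ sget s 3 + 1) (by push_cast; omega)]
  ring

theorem corner_box_sum {s : List Int} {n m : Nat} (hr : InR s n m) {i j : Nat}
    (hi : i < n) (hj : j < m) :
    (∑ a ∈ Finset.range (i + 1), ∑ b ∈ Finset.range (j + 1), corner s a b) = eff s i j := by
  obtain ⟨h1, h2, h3, h4, h5, h6⟩ := hr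
  unfold corner eff
  simp only [Finset.sum_add_distrib, Finset.sum_sub_distrib]
  rw [sum2_ind _ _ _ _ _ h1 h4, sum2_ind _ _ _ _ _ h1 (by omega),
      sum2_ind _ _ _ _ _ (by omega) h4, sum2_ind _ _ _ _ _ (by omega) (by omega)]
  push_cast
  split_ifs <;> omega
theorem list_sum_swap (l : List (List Int)) (f : List Int → Nat → Int) (S : Finset Nat) :
    (∑ t ∈ S, (l.map (fun s => f s t)).sum) = (l.map (fun s => ∑ t ∈ S, f s t)).sum := by
  induction l with
  | nil => simp
  | cons x xs ih => simp [Finset.sum_add_distrib, ih]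
-- generic additive-fold lemma
theorem foldl_additive {α : Type} (step : Int → α → Int) (δ : α → Int)
    (h : ∀ c x, step c x = c + δ x) : ∀ (l : List α) (c : Int), l.foldl step c = c + (l.map δ).sum := by
  intro l
  induction l with
  | nil => simp
  | cons x xs ih =>
    intro c
    rw [List.foldl_cons, h c x, ih]
    simp [add_assoc]
theorem enum_map_sum {α : Type} (g : Int → α → Int) (d : α) :
    ∀ (xs : List α) (i0 : Int),
    ((PySem.List.enumerate xs i0).map (fun p => g p.1 p.2)).sum =
      ∑ k ∈ Finset.range xs.length, g (i0 + k) (xs.getD k d) := by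
  intro xs
  induction xs with
  | nil => intro i0; simp [PySem.List.enumerate_nil]
  | cons x xs ih =>
    intro i0
    rw [PySem.List.enumerate_cons, List.map_cons, List.sum_cons, ih (i0 + 1),
        List.length_cons, Finset.sum_range_succ']
    have h1 : ∀ k : Nat, g (i0 + 1 + (k : Int)) (xs.getD k d)
        = g (i0 + ((k + 1 : Nat) : Int)) ((x :: xs).getD (k + 1) d) := by
      intro k
      rw [List.getD_cons_succ]
      congr 1
      push_cast
      ring
    rw [Finset.sum_congr rfl (fun k _ => h1 k)]
    simp [add_comm]
theorem cellTotal_eq (skill : List (List Int)) (i j hp : Int) :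
    cellTotal (skill.map effectOf) i j hp =
      hp + (skill.map (fun s =>
        if sget s 1 ≤ i ∧ i ≤ sget s 3 ∧ sget s 2 ≤ j ∧ j ≤ sget s 4 then degOf s else 0)).sum := by
  unfold cellTotal
  rw [foldl_additive _ (fun e => if e.1 ≤ i ∧ i ≤ e.2.2.1 ∧ e.2.1 ≤ j ∧ j ≤ e.2.2.2.1 then e.2.2.2.2 else 0)
      (by intro c x; split_ifs with h <;> simp [h])]
  rw [List.map_map]
  have : ((fun (e : Int × Int × Int × Int × Int) => if e.1 ≤ i ∧ i ≤ e.2.2.1 ∧ e.2.1 ≤ j ∧ j ≤ e.2.2.2.1 then e.2.2.2.2 else 0) ∘ effectOf)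
      = (fun s => if sget s 1 ≤ i ∧ i ≤ sget s 3 ∧ sget s 2 ≤ j ∧ j ≤ sget s 4 then degOf s else 0) := by
    funext s
    simp [Function.comp, effectOf, degOf]
  rw [this]
theorem shape_g0 (a b : Nat) : Shape (List.replicate a (List.replicate b (0:Int))) a b := by
  refine ⟨List.length_replicate, ?_⟩
  intro row hrow
  rw [List.eq_of_mem_replicate hrow]
  exact List.length_replicate

theorem gget_g0 (a b i j : Nat) : gget (List.replicate a (List.replicate b (0:Int))) i j = 0 := by
  unfold gget
  have h1 : (List.replicate a (List.replicate b (0:Int))).getD i [] = List.replicate b 0 ∨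
      (List.replicate a (List.replicate b (0:Int))).getD i [] = [] := by
    rcases Nat.lt_or_ge i a with h | h
    · left
      rw [List.getD_eq_getElem _ _ (by simpa using h)]
      simp
    · right
      rw [List.getD_eq_getElem?_getD, List.getElem?_eq_none (by simpa using h)]
      rfl
  rcases h1 with h | h <;> rw [h]
  · rcases Nat.lt_or_ge j b with h2 | h2
    · rw [List.getD_eq_getElem _ _ (by simpa using h2)]
      simp
    · rw [List.getD_eq_getElem?_getD, List.getElem?_eq_none (by simpa using h2)]
      rfl
  · rfl

-- A's final grid equals the per-cell sum of covering skills
theorem g3_eq (board skill : List (List Int)) (hpre : Pre_solution board skill)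
    {i j : Nat} (hi : i < board.length) (hj : j < (board.getD 0 []).length) :
    gget ((colPass (board.length + 1) ((board.getD 0 []).length + 1)
      ((rowPass (board.length + 1) ((board.getD 0 []).length + 1)
        (skill.foldl stepA (List.replicate (board.length + 1)
          (List.replicate ((board.getD 0 []).length + 1) 0)))).1)).1) i j
      = (skill.map (fun s => eff s i j)).sum := by
  obtain ⟨hne, hrect, hsk⟩ := hpre
  set n := board.length with hn
  set m := (board.getD 0 []).length with hm
  have hInR : ∀ s ∈ skill, InR s n m := by
    intro s hs
    obtain ⟨-, h1, h2, h3, h4, h5, h6⟩ := hsk s hs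
    exact ⟨h1, h2, h3, h4, h5, h6⟩
  set g0 : List (List Int) := List.replicate (n+1) (List.replicate (m+1) 0) with hg0
  set g1 := skill.foldl stepA g0 with hg1
  have hshape1 : Shape g1 (n+1) (m+1) := (gget_foldl_stepA skill hInR (shape_g0 _ _) 0 0).2
  have hv1 : ∀ i' j', gget g1 i' j' = (skill.map (fun s => corner s i' j')).sum := by
    intro i' j'
    have := (gget_foldl_stepA skill hInR (shape_g0 _ _) i' j').1
    rwa [gget_g0, zero_add] at this
  have hrz : ∀ i', ∑ t ∈ Finset.range (m + 1), gget g1 i' t = 0 := by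
    intro i'
    rw [Finset.sum_congr rfl (fun t _ => hv1 i' t), list_sum_swap]
    apply List.sum_eq_zero
    intro x hx
    obtain ⟨s, hsmem, rfl⟩ := List.mem_map.mp hx
    exact corner_row_sum (hInR s hsmem) i'
  obtain ⟨rg, -, rs⟩ := rowPass_char hshape1 hrz (n+1) (le_refl _)
  set g2 := (rowPass (n+1) (m+1) g1).1 with hg2
  have hv2 : ∀ i' j', i' ≤ n → j' ≤ m →
      gget g2 i' j' = ∑ t ∈ Finset.range (j' + 1), gget g1 i' t := by
    intro i' j' h1 h2
    rw [hg2, rowPass, rg i' j', if_pos ⟨by omega, h2⟩]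
  have hshape2 : Shape g2 (n+1) (m+1) := rs
  have hcz : ∀ j' ≤ m, ∑ t ∈ Finset.range (n + 1), gget g2 t j' = 0 := by
    intro j' hj'
    rw [Finset.sum_congr rfl (fun t ht => hv2 t j' (by
        have := Finset.mem_range.mp ht; omega) hj')]
    rw [Finset.sum_comm]
    apply Finset.sum_eq_zero
    intro u _
    rw [Finset.sum_congr rfl (fun t _ => hv1 t u), list_sum_swap]
    apply List.sum_eq_zero
    intro x hx
    obtain ⟨s, hsmem, rfl⟩ := List.mem_map.mp hx
    exact corner_col_sum (hInR s hsmem) u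
  obtain ⟨cg, -, -⟩ := colPass_char hshape2 hcz (m+1) (le_refl _)
  rw [colPass, cg i j, if_pos ⟨by omega, by omega⟩]
  rw [Finset.sum_congr rfl (fun t ht => hv2 t j (by
      have := Finset.mem_range.mp ht; omega) (by omega))]
  have swap1 : ∀ t : Nat, (∑ u ∈ Finset.range (j + 1), gget g1 t u)
      = (skill.map (fun s => ∑ u ∈ Finset.range (j + 1), corner s t u)).sum := by
    intro t
    rw [Finset.sum_congr rfl (fun u _ => hv1 t u), list_sum_swap]
  rw [Finset.sum_congr rfl (fun t _ => swap1 t), list_sum_swap]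
  congr 1
  apply List.map_congr_left
  intro s hsmem
  exact corner_box_sum (hInR s hsmem) hi hj

theorem solutionA_eq (board skill : List (List Int)) (hpre : Pre_solution board skill) :
    solution board skill =
      ∑ i ∈ Finset.range board.length, ∑ j ∈ Finset.range (board.getD 0 []).length,
        if (skill.map (fun s => eff s i j)).sum + gget board i j > 0 then (1 : Int) else 0 := by
  unfold solution
  set G := (colPass (board.length + 1) ((board.getD 0 []).length + 1)
      ((rowPass (board.length + 1) ((board.getD 0 []).length + 1)
        (skill.foldl stepA (List.replicate (board.length + 1)
          (List.replicate ((board.getD 0 []).length + 1) 0)))).1)).1 with hG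
  rw [foldl_additive
    (fun a i => (List.range (board.getD 0 []).length).foldl
      (fun a j => if gget G i j + gget board i j > 0 then a + 1 else a) a)
    (fun i => ((List.range (board.getD 0 []).length).map (fun j =>
      if gget G i j + gget board i j > 0 then (1 : Int) else 0)).sum)
    (by
      intro c i
      beta_reduce
      rw [foldl_additive
        (fun a j => if gget G i j + gget board i j > 0 then a + 1 else a)
        (fun j => if gget G i j + gget board i j > 0 then (1 : Int) else 0)
        (by intro c' j; beta_reduce; split_ifs with h <;> simp [h])])]
  rw [zero_add]
  show (∑ i ∈ Finset.range board.length, ∑ j ∈ Finset.range (board.getD 0 []).length, _) = _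
  refine Finset.sum_congr rfl (fun i hi => Finset.sum_congr rfl (fun j hj => ?_))
  rw [hG, g3_eq board skill hpre (Finset.mem_range.mp hi) (Finset.mem_range.mp hj)]
theorem list_range_map_sum (K : Nat) (f : Nat → Int) :
    ((List.range K).map f).sum = ∑ t ∈ Finset.range K, f t := rfl

theorem solutionB_eq (board skill : List (List Int)) (hpre : Pre_solution board skill) :
    solution_alt board skill =
      ∑ i ∈ Finset.range board.length, ∑ j ∈ Finset.range (board.getD 0 []).length,
        if gget board i j + (skill.map (fun s => eff s i j)).sum > 0 then (1 : Int) else 0 := by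
  unfold solution_alt
  set m := (board.getD 0 []).length with hm
  rw [foldl_additive
    (fun cnt (ir : Int × List Int) => (List.range m).foldl
      (fun cnt (j : Nat) => if cellTotal (skill.map effectOf) ir.1 (j : Int) ((PySem.List.pyGet? ir.2 (j : Int)).getD 0) > 0
        then cnt + 1 else cnt) cnt)
    (fun ir : Int × List Int => ((List.range m).map (fun (j : Nat) =>
      if cellTotal (skill.map effectOf) ir.1 (j : Int) ((PySem.List.pyGet? ir.2 (j : Int)).getD 0) > 0
      then (1 : Int) else 0)).sum)
    (by
      intro c ir
      beta_reduce
      rw [foldl_additive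
        (fun cnt (j : Nat) => if cellTotal (skill.map effectOf) ir.1 (j : Int) ((PySem.List.pyGet? ir.2 (j : Int)).getD 0) > 0
          then cnt + 1 else cnt)
        (fun (j : Nat) => if cellTotal (skill.map effectOf) ir.1 (j : Int) ((PySem.List.pyGet? ir.2 (j : Int)).getD 0) > 0
          then (1 : Int) else 0)
        (by intro c' j; beta_reduce; split_ifs with h <;> simp [h])])]
  rw [zero_add]
  rw [enum_map_sum (fun iv row => ((List.range m).map (fun (j : Nat) =>
      if cellTotal (skill.map effectOf) iv (j : Int) ((PySem.List.pyGet? row (j : Int)).getD 0) > 0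
      then (1 : Int) else 0)).sum)
    [] board 0]
  refine Finset.sum_congr rfl (fun i hi => ?_)
  rw [list_range_map_sum]
  refine Finset.sum_congr rfl (fun j hj => ?_)
  have hget : (PySem.List.pyGet? (board.getD i []) (j : Int)).getD 0 = gget board i j := by
    rw [PySem.List.pyGet?_natCast]
    rfl
  rw [hget, cellTotal_eq, show ((0 : Int) + (i : Int)) = (i : Int) by ring]
  rfl
-- ===== VERDICT (by name: the statement is the Claim_ definition above) =====
theorem solution_spec : Claim_equal_solution := by
  unfold Claim_equal_solution
  intro board skill _ hpre
  unfold Spec_solution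
  rw [solutionA_eq board skill hpre, solutionB_eq board skill hpre]
  refine Finset.sum_congr rfl (fun i _ => Finset.sum_congr rfl (fun j _ => ?_))
  rw [Int.add_comm ((skill.map (fun s => eff s i j)).sum) (gget board i j)]
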